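-- pv_equiv track=rewrite | github.com/sgl-project/sglang-jax | python/sgl_jax/srt/kernels/ragged_paged_attention/ragged_paged_attention_v3.py | has_bank_conflicts
-- ===== SOURCE A (Python) =====
-- def has_bank_conflicts(stride, distance=24, num_banks=32):
--     banks = set()
--     for i in range(distance):
--         bank = (i * stride) % num_banks
--         if bank in banks:
--             return True
--         banks.add(bank)
--     return False
-- ===== SOURCE B (Python) =====
-- def has_bank_conflicts(stride, distance=24, num_banks=32):
--     # Closed form: residues i*stride mod num_banks are periodic with period
--     # p = |num_banks| // gcd(stride, num_banks); the first repeat is at index p.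
--     if distance <= 0:
--         return False
--     a, b = abs(stride), abs(num_banks)
--     while b:
--         a, b = b, a % b
--     return distance > abs(num_banks) // a
-- ===== Notes on version B (the rewrite author's own statement) =====
-- stated objective: faster
-- what changed: Replaces the O(distance) loop-and-seen-set scan with a closed form: the residue sequence i*stride mod num_banks first repeats at index |num_banks|//gcd(stride,num_banks), so B computes one gcd and compares it to distance.
-- outside the precondition, e.g. on has_bank_conflicts(3, 5, 0): A raises ZeroDivisionError, B returns True
import Mathlib
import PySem

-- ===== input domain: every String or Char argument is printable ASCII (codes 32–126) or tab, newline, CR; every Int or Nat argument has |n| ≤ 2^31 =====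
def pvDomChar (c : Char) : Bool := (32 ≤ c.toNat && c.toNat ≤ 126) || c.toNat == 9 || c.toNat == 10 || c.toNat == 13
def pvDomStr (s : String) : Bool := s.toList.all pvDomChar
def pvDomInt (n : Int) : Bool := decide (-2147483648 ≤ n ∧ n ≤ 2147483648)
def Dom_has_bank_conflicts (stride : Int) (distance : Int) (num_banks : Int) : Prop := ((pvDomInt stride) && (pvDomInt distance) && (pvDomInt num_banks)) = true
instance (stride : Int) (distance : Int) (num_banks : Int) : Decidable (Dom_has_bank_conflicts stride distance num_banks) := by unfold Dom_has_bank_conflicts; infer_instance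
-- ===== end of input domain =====

-- B replaces A's O(distance) seen-set loop with a closed form (one gcd and a comparison); measured faster.


-- ===== PORT A =====
-- 'banks = set(); for i in range(distance): bank = (i*stride) % num_banks;
--  if bank in banks: return True; banks.add(bank); return False'
-- range(distance) is iterated lazily: the loop counts i up with the remaining
-- iteration count as fuel; 'banks' is a hash set, as Python's set is.
def pvBankLoop (stride : Int) (num_banks : Int) : Nat → Int → Std.HashSet Int → Bool
  | 0, _, _ => false
  | fuel + 1, i, banks =>
    let bank := PySem.Int.mod (i * stride) num_banks
    if banks.contains bank then true
    else pvBankLoop stride num_banks fuel (i + 1) (banks.insert bank)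

def has_bank_conflicts (stride : Int) (distance : Int) (num_banks : Int) : Bool :=
  pvBankLoop stride num_banks distance.toNat 0 (∅ : Std.HashSet Int)

-- ===== PORT B =====
-- 'while b: a, b = b, a % b'  (Euclid on the absolute values)
def pvGcdLoop : Nat → Nat → Nat
  | a, 0 => a
  | a, b + 1 => pvGcdLoop (b + 1) (a % (b + 1))
  termination_by a b => b
  decreasing_by exact Nat.mod_lt _ (Nat.succ_pos b)

def has_bank_conflicts_alt (stride : Int) (distance : Int) (num_banks : Int) : Bool :=
  if distance ≤ 0 then false
  else
    let a := pvGcdLoop stride.natAbs num_banks.natAbs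
    decide (distance > PySem.Int.floordiv (num_banks.natAbs : Int) (a : Int))

-- ===== PRECONDITION & SPEC =====
-- Pre_ excludes num_banks = 0 with distance > 0: there A raises ZeroDivisionError ((i*stride) % 0).
def Pre_has_bank_conflicts (stride : Int) (distance : Int) (num_banks : Int) : Prop :=
  distance ≤ 0 ∨ num_banks ≠ 0
instance (stride : Int) (distance : Int) (num_banks : Int) : Decidable (Pre_has_bank_conflicts stride distance num_banks) := by unfold Pre_has_bank_conflicts; infer_instance

def pvWitness_has_bank_conflicts : Int × Int × Int := (3, 24, 32)

def Spec_has_bank_conflicts (stride : Int) (distance : Int) (num_banks : Int) (out : Bool) : Prop := out = has_bank_conflicts_alt stride distance num_banks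
instance (stride : Int) (distance : Int) (num_banks : Int) (out : Bool) : Decidable (Spec_has_bank_conflicts stride distance num_banks out) := by unfold Spec_has_bank_conflicts; infer_instance

-- ===== CLAIM (what is proved, stated in full; the proofs are below) =====
def Claim_equal_has_bank_conflicts : Prop := ∀ (stride : Int) (distance : Int) (num_banks : Int), Dom_has_bank_conflicts stride distance num_banks → Pre_has_bank_conflicts stride distance num_banks → Spec_has_bank_conflicts stride distance num_banks (has_bank_conflicts stride distance num_banks)

-- ===== LEMMAS AND PROOFS =====

-- Euclid loop computes Nat.gcd (with arguments swapped).
theorem pvGcdLoop_eq (b : Nat) : ∀ a, pvGcdLoop a b = Nat.gcd b a := by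
  induction b using Nat.strong_induction_on with
  | _ b ih =>
    intro a
    match b with
    | 0 => simp [pvGcdLoop]
    | c + 1 =>
      rw [pvGcdLoop, ih (a % (c + 1)) (Nat.mod_lt _ (Nat.succ_pos c)), Nat.gcd_rec (c + 1) a]

-- Python '%' equality is congruence mod the divisor.
theorem pvMod_eq_iff (a b n : Int) (hn : n ≠ 0) :
    PySem.Int.mod a n = PySem.Int.mod b n ↔ n ∣ (a - b) := by
  have ha := PySem.Int.floordiv_mul_add_mod a n
  have hb := PySem.Int.floordiv_mul_add_mod b n
  constructor
  · intro h
    refine ⟨PySem.Int.floordiv a n - PySem.Int.floordiv b n, ?_⟩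
    nlinarith [ha, hb]
  · intro ⟨k, hk⟩
    have hd : n ∣ (PySem.Int.mod a n - PySem.Int.mod b n) := by
      refine ⟨k - (PySem.Int.floordiv a n - PySem.Int.floordiv b n), ?_⟩
      nlinarith [ha, hb]
    by_contra hne
    have hdne : PySem.Int.mod a n - PySem.Int.mod b n ≠ 0 := fun h => hne (by omega)
    have habs : |n| ≤ |PySem.Int.mod a n - PySem.Int.mod b n| := by
      refine Int.le_of_dvd (abs_pos.mpr hdne) ((abs_dvd _ _).mpr ((dvd_abs _ _).mpr hd))
    rcases lt_or_gt_of_ne hn with h0 | h0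
    · have b1 := PySem.Int.mod_neg_bounds a h0
      have b2 := PySem.Int.mod_neg_bounds b h0
      rw [abs_of_neg h0] at habs
      rcases abs_cases (PySem.Int.mod a n - PySem.Int.mod b n) with ⟨he, _⟩ | ⟨he, _⟩ <;> omega
    · have b1 := PySem.Int.mod_nonneg a h0
      have b2 := PySem.Int.mod_nonneg b h0
      have c1 := PySem.Int.mod_lt a h0
      have c2 := PySem.Int.mod_lt b h0
      rw [abs_of_pos h0] at habs
      rcases abs_cases (PySem.Int.mod a n - PySem.Int.mod b n) with ⟨he, _⟩ | ⟨he, _⟩ <;> omega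

-- N ∣ M * S  ↔  N / gcd N S ∣ M   (for N ≠ 0), over Nat.
theorem pvDvdMulIff (N S M : Nat) (hN : 0 < N) :
    N ∣ M * S ↔ N / Nat.gcd N S ∣ M := by
  set g := Nat.gcd N S with hg
  have hgpos : 0 < g := Nat.gcd_pos_of_pos_left S hN
  obtain ⟨N', hN'⟩ := Nat.gcd_dvd_left N S
  obtain ⟨S', hS'⟩ := Nat.gcd_dvd_right N S
  have hNq : N / g = N' := by rw [hN']; exact Nat.mul_div_cancel_left _ hgpos
  have hSq : S / g = S' := by rw [hS']; exact Nat.mul_div_cancel_left _ hgpos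
  have hcop : Nat.Coprime N' S' := by
    have h := Nat.coprime_div_gcd_div_gcd (m := N) (n := S) hgpos
    rwa [← hg, hNq, hSq] at h
  rw [hNq]
  constructor
  · intro h
    have h2 : g * N' ∣ g * (M * S') := by
      rw [← hN']
      calc N ∣ M * S := h
        _ = g * (M * S') := by rw [hS']; ring
    exact hcop.dvd_of_dvd_mul_right ((Nat.mul_dvd_mul_iff_left hgpos).mp h2)
  · intro h
    have h2 : g * N' ∣ g * (M * S') := Nat.mul_dvd_mul_left g (h.mul_right S')
    rw [← hN'] at h2
    calc N ∣ g * (M * S') := h2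
      _ = M * S := by rw [hS']; ring

-- Loop characterisation: if the hash set's members are the duplicate-free list B,
-- the loop returns false iff B extended by the banks of the remaining indices stays duplicate-free.
theorem pvBankLoop_char (s n : Int) : ∀ (f : Nat) (i : Int) (H : Std.HashSet Int) (B : List Int),
    B.Nodup → (∀ x, H.contains x = true ↔ x ∈ B) →
    pvBankLoop s n f i H =
      !decide ((B ++ (List.range f).map (fun k : Nat => PySem.Int.mod ((i + (k : Int)) * s) n)).Nodup) := by
  intro f
  induction f with
  | zero => intro i H B hB hH; simp [pvBankLoop, hB]
  | succ f ih =>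
    intro i H B hB hH
    rw [pvBankLoop]
    rw [List.range_succ_eq_map, List.map_cons, List.map_map]
    have hbank0 : PySem.Int.mod ((i + ((0 : Nat) : Int)) * s) n = PySem.Int.mod (i * s) n := by
      norm_num
    have hmapeq : (List.range f).map ((fun k : Nat => PySem.Int.mod ((i + (k : Int)) * s) n) ∘ Nat.succ)
        = (List.range f).map (fun k : Nat => PySem.Int.mod (((i + 1) + (k : Int)) * s) n) := by
      apply List.map_congr_left
      intro k _
      simp only [Function.comp]
      congr 1
      push_cast
      ring
    rw [hbank0, hmapeq]
    by_cases hmem : PySem.Int.mod (i * s) n ∈ B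
    · have hc : H.contains (PySem.Int.mod (i * s) n) = true := (hH _).mpr hmem
      simp only [hc, if_true]
      have hnot : ¬ (B ++ PySem.Int.mod (i * s) n ::
          (List.range f).map (fun k : Nat => PySem.Int.mod (((i + 1) + (k : Int)) * s) n)).Nodup := by
        intro hnd
        rcases List.nodup_append.mp hnd with ⟨_, _, hdisj⟩
        exact hdisj _ hmem _ (List.mem_cons_self) rfl
      simp [hnot]
    · have hc : H.contains (PySem.Int.mod (i * s) n) = false := by
        by_contra h
        exact hmem ((hH _).mp (by revert h; cases H.contains (PySem.Int.mod (i * s) n) <;> simp))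
      simp only [hc, if_false, Bool.false_eq_true]
      rw [ih (i + 1) (H.insert (PySem.Int.mod (i * s) n)) (B ++ [PySem.Int.mod (i * s) n])
        (by
          refine hB.append (List.nodup_singleton _) ?_
          intro a ha hmem2
          rw [List.mem_singleton] at hmem2
          exact hmem (hmem2 ▸ ha))
        (by
          intro x
          rw [Std.HashSet.contains_insert, List.mem_append, List.mem_singleton]
          constructor
          · intro h
            rcases Bool.or_eq_true_iff.mp h with h | h
            · exact Or.inr (by simpa using (beq_iff_eq.mp h).symm)
            · exact Or.inl ((hH _).mp h)
          · intro h
            rcases h with h | h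
            · exact Bool.or_eq_true_iff.mpr (Or.inr ((hH _).mpr h))
            · exact Bool.or_eq_true_iff.mpr (Or.inl (beq_iff_eq.mpr h.symm)))]
      simp

-- ===== VERDICT (by name: the statement is the Claim_ definition above) =====
theorem has_bank_conflicts_spec : Claim_equal_has_bank_conflicts := by
  intro s d n _ hpre
  unfold Spec_has_bank_conflicts has_bank_conflicts has_bank_conflicts_alt
  by_cases hd : d ≤ 0
  · have : d.toNat = 0 := by omega
    rw [this]
    simp [pvBankLoop, hd]
  · push_neg at hd
    have hn : n ≠ 0 := by rcases hpre with h | h; omega; exact h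
    simp only [if_neg (by omega : ¬ d ≤ 0)]
    -- names
    set N := n.natAbs with hNdef
    set S := s.natAbs with hSdef
    have hNpos : 0 < N := Int.natAbs_pos.mpr hn
    have hgcd : pvGcdLoop S N = Nat.gcd N S := pvGcdLoop_eq N S
    set p := N / Nat.gcd N S with hpdef
    have hppos : 0 < p := Nat.div_pos (Nat.le_of_dvd hNpos (Nat.gcd_dvd_left N S))
      (Nat.gcd_pos_of_pos_left S hNpos)
    -- the RHS value
    have hrhs : decide (d > PySem.Int.floordiv (N : Int) ((pvGcdLoop S N : Nat) : Int))
        = decide ((p : Int) < d) := by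
      rw [hgcd, PySem.Int.floordiv_natCast]
    rw [hrhs]
    -- the LHS loop
    have hloop := pvBankLoop_char s n d.toNat 0 (∅ : Std.HashSet Int) [] List.nodup_nil
      (by intro x; simp [Std.HashSet.contains_empty])
    rw [hloop]
    simp only [List.nil_append, zero_add]
    -- bank equality as divisibility by p
    have hbank : ∀ i j : Int, (PySem.Int.mod (i * s) n = PySem.Int.mod (j * s) n ↔ (p : Int) ∣ (i - j)) := by
      intro i j
      rw [pvMod_eq_iff _ _ _ hn]
      have h1 : i * s - j * s = (i - j) * s := by ring
      rw [h1, ← Int.natAbs_dvd_natAbs, Int.natAbs_mul]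
      rw [← Int.natAbs_dvd_natAbs (a := (p : Int)), Int.natAbs_natCast]
      exact pvDvdMulIff N S (i - j).natAbs hNpos
    set D := d.toNat with hDdef
    have hDd : (D : Int) = d := by omega
    have hDpos : 0 < D := by omega
    -- Nodup of the residue list ↔ D ≤ p
    have hchar : ((List.range D).map (fun k : Nat => PySem.Int.mod ((k : Int) * s) n)).Nodup ↔ D ≤ p := by
      constructor
      · intro hnd
        by_contra hlt
        push_neg at hlt
        have hne := List.Nodup.getElem_inj_iff (l := (List.range D).map _) hnd
          (i := 0) (j := p) (hi := by simpa using hDpos) (hj := by simpa using hlt)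
        simp only [List.getElem_map, List.getElem_range] at hne
        have heq : PySem.Int.mod (((0 : Nat) : Int) * s) n = PySem.Int.mod (((p : Nat) : Int) * s) n := by
          rw [hbank]
          exact ⟨-1, by push_cast; ring⟩
        have := hne.mp heq
        omega
      · intro hle
        apply List.Nodup.map_on _ (List.nodup_range)
        intro x hx y hy hxy
        simp only [List.mem_range] at hx hy
        have hdvd : (p : Int) ∣ ((x : Int) - (y : Int)) := (hbank _ _).mp hxy
        by_contra hne
        have habs : (p : Nat) ∣ ((x : Int) - (y : Int)).natAbs := by
          rw [← Int.natAbs_natCast p]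
          exact Int.natAbs_dvd_natAbs.mpr hdvd
        have h1 : 0 < ((x : Int) - (y : Int)).natAbs := by omega
        have h2 : ((x : Int) - (y : Int)).natAbs < p := by omega
        have := Nat.le_of_dvd h1 habs
        omega
    by_cases hcase : D ≤ p
    · simp [hchar.mpr hcase]; omega
    · have hnot : ¬ ((List.range D).map (fun k : Nat => PySem.Int.mod ((k : Int) * s) n)).Nodup :=
        fun h => hcase (hchar.mp h)
      simp [hnot]; omega
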